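-- pv_equiv track=rewrite | github.com/anyyw/HackerRank | Weekofcode33/TwinArrays/TwinArrays.py | twinArrays
-- ===== SOURCE A (Python) =====
-- def twinArrays(ar1, ar2):
--     #Iterate through each array, find the minimum and next minimum
--     #If minumim for both arrays have the same index, cross compare the two next min
--     first1 = min(ar1)
--     first2 = min(ar2)
--     second1 = max(ar1)
--     second2 = max(ar2)
--
--     for c in ar1:
--         if (c < second1) and (c != first1):
--             second1 = c
--     for d in ar2:
--         if (d < second2) and (d != first2):
--             second2 = d
--
--     indices1 = [i for i, x in enumerate(ar1) if x == first1]
--     indices2 = [i for i, x in enumerate(ar2) if x == first2]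
--
--     if (ar1.index(first1) != ar2.index(first2)) or ((len(indices1) != 1) or (len(indices2) != 1)):
--         return first1 + first2
--     else:
--         secondmin1 = first1 + second2
--         secondmin2 = first2 + second1
--         return secondmin1 if (secondmin1 < secondmin2) else secondmin2
-- ===== SOURCE B (Python) =====
-- def twinArrays(ar1, ar2):
--     # Brute-force minimization over all valid index pairs i != j.
--     best = None
--     for i, x in enumerate(ar1):
--         for j, y in enumerate(ar2):
--             if i != j:
--                 s = x + y
--                 if best is None or s < best:
--                     best = s
--     if best is None:
--         best = ar1[0] + ar2[0]
--     return best
-- ===== Notes on version B (the rewrite author's own statement) =====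
-- stated objective: simpler
-- what changed: Replaces A's min/second-min/index-matching passes and case analysis with one direct brute-force minimization of ar1[i]+ar2[j] over all valid index pairs i != j (falling back to ar1[0]+ar2[0] when no such pair exists, i.e. both arrays have length 1).
-- intended difference: When one array has length 1 and the other has length >= 2 with its minimum occurring uniquely at index 0, A returns min(ar1)+min(ar2) which pairs the two minima at the same index 0 (forbidden), while B returns the true minimum over pairs with differing indices, which is the intended value. — e.g. on twinArrays([1], [2, 3]): A returns 3, B returns 4
import Mathlib
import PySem

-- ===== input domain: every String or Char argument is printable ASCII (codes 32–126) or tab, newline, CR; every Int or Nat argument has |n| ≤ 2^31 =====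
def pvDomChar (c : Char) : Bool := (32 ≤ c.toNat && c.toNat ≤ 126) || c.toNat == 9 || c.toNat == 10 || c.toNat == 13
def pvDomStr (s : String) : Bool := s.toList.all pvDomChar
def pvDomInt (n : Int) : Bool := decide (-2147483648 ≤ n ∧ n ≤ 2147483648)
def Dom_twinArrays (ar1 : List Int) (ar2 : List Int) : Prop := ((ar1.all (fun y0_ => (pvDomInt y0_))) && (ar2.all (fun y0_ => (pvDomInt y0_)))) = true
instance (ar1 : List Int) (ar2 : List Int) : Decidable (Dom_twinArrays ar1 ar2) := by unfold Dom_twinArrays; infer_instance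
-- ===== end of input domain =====

-- B replaces A's min/second-min/index-matching passes by one direct brute-force
-- minimization over all index pairs i ≠ j (objective: simpler); A and B differ on
-- the D_ region stated below, where A pairs the two minima at the same index.

-- ===== PORT A =====
def twinArrays (ar1 : List Int) (ar2 : List Int) : Int :=
  let first1 := (PySem.List.min? ar1 (fun x => x)).getD 0
  let first2 := (PySem.List.min? ar2 (fun x => x)).getD 0
  let second1 := (PySem.List.max? ar1 (fun x => x)).getD 0
  let second2 := (PySem.List.max? ar2 (fun x => x)).getD 0
  let second1 := ar1.foldl (fun s c => if c < s ∧ c ≠ first1 then c else s) second1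
  let second2 := ar2.foldl (fun s d => if d < s ∧ d ≠ first2 then d else s) second2
  let indices1 := (PySem.List.enumerate ar1).filterMap (fun p => if p.2 = first1 then some p.1 else none)
  let indices2 := (PySem.List.enumerate ar2).filterMap (fun p => if p.2 = first2 then some p.1 else none)
  if PySem.List.index? ar1 first1 ≠ PySem.List.index? ar2 first2 ∨ (indices1.length ≠ 1 ∨ indices2.length ≠ 1) then
    first1 + first2
  else
    let secondmin1 := first1 + second2
    let secondmin2 := first2 + second1
    if secondmin1 < secondmin2 then secondmin1 else secondmin2

-- ===== PORT B =====
def twinArrays_alt (ar1 : List Int) (ar2 : List Int) : Int :=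
  let best :=
    (PySem.List.enumerate ar1).foldl (fun b p =>
      (PySem.List.enumerate ar2).foldl (fun b q =>
        if p.1 ≠ q.1 then
          let s := p.2 + q.2
          match b with
          | none => some s
          | some v => if s < v then some s else some v
        else b) b) (none : Option Int)
  match best with
  | some v => v
  | none => (PySem.List.pyGet? ar1 0).getD 0 + (PySem.List.pyGet? ar2 0).getD 0

-- ===== PRECONDITION & SPEC =====
-- Pre_ excludes empty lists, on which A raises ValueError (min of empty sequence).
def Pre_twinArrays (ar1 : List Int) (ar2 : List Int) : Prop := ar1 ≠ [] ∧ ar2 ≠ []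
instance (ar1 : List Int) (ar2 : List Int) : Decidable (Pre_twinArrays ar1 ar2) := by unfold Pre_twinArrays; infer_instance
def pvWitness_twinArrays : List Int × List Int := ([1, 2], [3, 4])

-- When one array has length 1 and the other has length ≥ 2 with its minimum occurring
-- uniquely at index 0, A returns min(ar1)+min(ar2), pairing the two minima at the same
-- (forbidden) index 0, while B returns the intended minimum over pairs of differing indices.
def D_twinArrays (ar1 : List Int) (ar2 : List Int) : Prop :=
  (ar1.length = 1 ∧ 2 ≤ ar2.length ∧ ∀ y ∈ ar2.tail, ar2.headD 0 < y) ∨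
  (ar2.length = 1 ∧ 2 ≤ ar1.length ∧ ∀ x ∈ ar1.tail, ar1.headD 0 < x)
instance (ar1 : List Int) (ar2 : List Int) : Decidable (D_twinArrays ar1 ar2) := by unfold D_twinArrays; infer_instance

def Spec_twinArrays (ar1 : List Int) (ar2 : List Int) (out : Int) : Prop := ¬ D_twinArrays ar1 ar2 → out = twinArrays_alt ar1 ar2
instance (ar1 : List Int) (ar2 : List Int) (out : Int) : Decidable (Spec_twinArrays ar1 ar2 out) := by unfold Spec_twinArrays; infer_instance

def pvDiffWitness_twinArrays : List Int × List Int := ([1], [2, 3])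
def pvDiffWitnessOut_twinArrays : Int × Int := (3, 4)

-- ===== CLAIM (what is proved, stated in full; the proofs are below) =====
def Claim_unchanged_twinArrays : Prop := ∀ (ar1 : List Int) (ar2 : List Int), Dom_twinArrays ar1 ar2 → Pre_twinArrays ar1 ar2 → Spec_twinArrays ar1 ar2 (twinArrays ar1 ar2)
def Claim_changed_twinArrays : Prop := Dom_twinArrays (pvDiffWitness_twinArrays.1) (pvDiffWitness_twinArrays.2) ∧ Pre_twinArrays (pvDiffWitness_twinArrays.1) (pvDiffWitness_twinArrays.2) ∧ D_twinArrays (pvDiffWitness_twinArrays.1) (pvDiffWitness_twinArrays.2) ∧ twinArrays (pvDiffWitness_twinArrays.1) (pvDiffWitness_twinArrays.2) = pvDiffWitnessOut_twinArrays.1 ∧ twinArrays_alt (pvDiffWitness_twinArrays.1) (pvDiffWitness_twinArrays.2) = pvDiffWitnessOut_twinArrays.2 ∧ pvDiffWitnessOut_twinArrays.1 ≠ pvDiffWitnessOut_twinArrays.2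
def Claim_exact_twinArrays : Prop := ∀ (ar1 : List Int) (ar2 : List Int), Dom_twinArrays ar1 ar2 → Pre_twinArrays ar1 ar2 → D_twinArrays ar1 ar2 → twinArrays ar1 ar2 ≠ twinArrays_alt ar1 ar2

-- ===== LEMMAS AND PROOFS =====

def pvf (b : Option Int) (s : Int) : Option Int :=
  match b with
  | none => some s
  | some v => if s < v then some s else some v

theorem foldl_pvf_some (L : List Int) : ∀ (a : Int), ∃ m, L.foldl pvf (some a) = some m ∧ (m = a ∨ m ∈ L) ∧ m ≤ a ∧ ∀ s ∈ L, m ≤ s := by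
  induction L with
  | nil => intro a; exact ⟨a, rfl, Or.inl rfl, le_refl _, by simp⟩
  | cons x t ih =>
    intro a
    by_cases hx : x < a
    · obtain ⟨m, h1, h2, h3, h4⟩ := ih x
      refine ⟨m, ?_, ?_, by omega, ?_⟩
      · simpa [List.foldl, pvf, hx] using h1
      · rcases h2 with h | h <;> simp [h]
      · intro s hs; rcases List.mem_cons.1 hs with h | h
        · omega
        · exact h4 s h
    · obtain ⟨m, h1, h2, h3, h4⟩ := ih a
      refine ⟨m, ?_, ?_, h3, ?_⟩
      · simpa [List.foldl, pvf, hx] using h1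
      · rcases h2 with h | h <;> simp [h]
      · intro s hs; rcases List.mem_cons.1 hs with h | h
        · omega
        · exact h4 s h

theorem foldl_pvf_none (L : List Int) (h : L ≠ []) : ∃ m, L.foldl pvf none = some m ∧ m ∈ L ∧ ∀ s ∈ L, m ≤ s := by
  match L with
  | x :: t =>
    obtain ⟨m, h1, h2, h3, h4⟩ := foldl_pvf_some t x
    refine ⟨m, ?_, ?_, ?_⟩
    · simpa [List.foldl, pvf] using h1
    · rcases h2 with h | h <;> simp [h]
    · intro s hs; rcases List.mem_cons.1 hs with h | h
      · omega
      · exact h4 s h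

def pvSums (ar1 ar2 : List Int) : List Int :=
  (PySem.List.enumerate ar1).flatMap (fun p =>
    (PySem.List.enumerate ar2).filterMap (fun q => if p.1 ≠ q.1 then some (p.2 + q.2) else none))

theorem inner_fold_eq (p : Int × Int) (l : List (Int × Int)) : ∀ (b : Option Int),
    l.foldl (fun b q =>
        if p.1 ≠ q.1 then
          let s := p.2 + q.2
          match b with
          | none => some s
          | some v => if s < v then some s else some v
        else b) b
      = (l.filterMap (fun q => if p.1 ≠ q.1 then some (p.2 + q.2) else none)).foldl pvf b := by
  induction l with
  | nil => intro b; rfl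
  | cons q t ih =>
    intro b
    by_cases hq : p.1 ≠ q.1
    · simp only [List.foldl, List.filterMap_cons, if_pos hq, ih]; rfl
    · simp only [List.foldl, List.filterMap_cons, if_neg hq, ih]

theorem outer_fold_eq (ar2 : List Int) (l : List (Int × Int)) : ∀ (b : Option Int),
    l.foldl (fun b p =>
      (PySem.List.enumerate ar2).foldl (fun b q =>
        if p.1 ≠ q.1 then
          let s := p.2 + q.2
          match b with
          | none => some s
          | some v => if s < v then some s else some v
        else b) b) b
    = (l.flatMap (fun p => (PySem.List.enumerate ar2).filterMap (fun q => if p.1 ≠ q.1 then some (p.2 + q.2) else none))).foldl pvf b := by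
  induction l with
  | nil => intro b; rfl
  | cons p t ih =>
    intro b
    simp only [List.foldl, ih]
    rw [inner_fold_eq, List.flatMap_cons, List.foldl_append]

theorem mem_pvSums (ar1 ar2 : List Int) (s : Int) :
    s ∈ pvSums ar1 ar2 ↔ ∃ (i j : Nat) (hi : i < ar1.length) (hj : j < ar2.length), i ≠ j ∧ s = ar1[i] + ar2[j] := by
  simp only [pvSums, List.mem_flatMap, List.mem_filterMap, PySem.List.mem_enumerate_iff]
  constructor
  · rintro ⟨p, ⟨i, hi, rfl⟩, q, ⟨j, hj, rfl⟩, hq⟩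
    simp only [zero_add] at hq
    split_ifs at hq with hij
    simp only [Option.some.injEq] at hq
    exact ⟨i, j, hi, hj, by exact_mod_cast hij, hq.symm⟩
  · rintro ⟨i, j, hi, hj, hij, rfl⟩
    refine ⟨(i, ar1[i]), ⟨i, hi, by simp⟩, (j, ar2[j]), ⟨j, hj, by simp⟩, ?_⟩
    have : (i : Int) ≠ (j : Int) := by exact_mod_cast hij
    simp [this]

theorem alt_eq_of_ne (ar1 ar2 : List Int) (h : pvSums ar1 ar2 ≠ []) :
    twinArrays_alt ar1 ar2 ∈ pvSums ar1 ar2 ∧ ∀ s ∈ pvSums ar1 ar2, twinArrays_alt ar1 ar2 ≤ s := by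
  obtain ⟨m, h1, h2, h3⟩ := foldl_pvf_none _ h
  have : twinArrays_alt ar1 ar2 = m := by
    simp only [twinArrays_alt, outer_fold_eq]
    rw [show (List.flatMap (fun p => List.filterMap (fun q => if p.1 ≠ q.1 then some (p.2 + q.2) else none) (PySem.List.enumerate ar2)) (PySem.List.enumerate ar1)) = pvSums ar1 ar2 from rfl, h1]
  rw [this]; exact ⟨h2, h3⟩

theorem alt_eq_of_nil (ar1 ar2 : List Int) (h : pvSums ar1 ar2 = []) :
    twinArrays_alt ar1 ar2 = (PySem.List.pyGet? ar1 0).getD 0 + (PySem.List.pyGet? ar2 0).getD 0 := by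
  simp only [twinArrays_alt, outer_fold_eq]
  rw [show (List.flatMap (fun p => List.filterMap (fun q => if p.1 ≠ q.1 then some (p.2 + q.2) else none) (PySem.List.enumerate ar2)) (PySem.List.enumerate ar1)) = pvSums ar1 ar2 from rfl, h]
  rfl

theorem pvSums_ne_nil (ar1 ar2 : List Int) (h1 : ar1 ≠ []) (h2 : ar2 ≠ []) (h : ¬(ar1.length = 1 ∧ ar2.length = 1)) :
    pvSums ar1 ar2 ≠ [] := by
  have l1 : 0 < ar1.length := List.length_pos_iff.mpr h1
  have l2 : 0 < ar2.length := List.length_pos_iff.mpr h2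
  have : ∃ s, s ∈ pvSums ar1 ar2 := by
    by_cases hl : 2 ≤ ar2.length
    · exact ⟨ar1[0] + ar2[1], (mem_pvSums _ _ _).2 ⟨0, 1, l1, hl, by omega, rfl⟩⟩
    · have hl1 : 2 ≤ ar1.length := by omega
      exact ⟨ar1[1] + ar2[0], (mem_pvSums _ _ _).2 ⟨1, 0, hl1, l2, by omega, rfl⟩⟩
  obtain ⟨s, hs⟩ := this
  exact List.ne_nil_of_mem hs

theorem pvSums_nil (ar1 ar2 : List Int) (h1 : ar1.length = 1) (h2 : ar2.length = 1) :
    pvSums ar1 ar2 = [] := by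
  match ar1, ar2 with
  | [a], [b] => rfl

theorem second_fold (first : Int) : ∀ (l : List Int) (init : Int), init ≠ first →
    (l.foldl (fun s c => if c < s ∧ c ≠ first then c else s) init = init ∨
       l.foldl (fun s c => if c < s ∧ c ≠ first then c else s) init ∈ l) ∧
    l.foldl (fun s c => if c < s ∧ c ≠ first then c else s) init ≠ first ∧
    l.foldl (fun s c => if c < s ∧ c ≠ first then c else s) init ≤ init ∧
    ∀ c ∈ l, c ≠ first → l.foldl (fun s c => if c < s ∧ c ≠ first then c else s) init ≤ c := by
  intro l
  induction l with
  | nil => intro init h; exact ⟨Or.inl rfl, h, le_refl _, by simp⟩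
  | cons c t ih =>
    intro init hinit
    by_cases hc : c < init ∧ c ≠ first
    · obtain ⟨h1, h2, h3, h4⟩ := ih c hc.2
      simp only [List.foldl, if_pos hc]
      refine ⟨?_, h2, by omega, ?_⟩
      · rcases h1 with h | h <;> simp [h]
      · intro d hd hdf
        rcases List.mem_cons.1 hd with h | h
        · omega
        · exact h4 d h hdf
    · obtain ⟨h1, h2, h3, h4⟩ := ih init hinit
      simp only [List.foldl, if_neg hc]
      refine ⟨?_, h2, h3, ?_⟩
      · rcases h1 with h | h <;> simp [h]
      · intro d hd hdf
        rcases List.mem_cons.1 hd with h | h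
        · subst h
          rcases not_and_or.1 hc with h | h
          · omega
          · exact absurd hdf h
        · exact h4 d h hdf

-- index lists
theorem mem_pvInd (v : Int) : ∀ (xs : List Int) (s : Int) (i : Int),
    i ∈ (PySem.List.enumerate xs s).filterMap (fun p => if p.2 = v then some p.1 else none) ↔
      ∃ (k : Nat) (h : k < xs.length), i = s + k ∧ xs[k] = v := by
  intro xs s i
  simp only [List.mem_filterMap, PySem.List.mem_enumerate_iff]
  constructor
  · rintro ⟨p, ⟨k, hk, rfl⟩, hp⟩
    split_ifs at hp with hv
    simp only [Option.some.injEq] at hp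
    exact ⟨k, hk, hp.symm, hv⟩
  · rintro ⟨k, hk, rfl, hv⟩
    exact ⟨(s + k, xs[k]), ⟨k, hk, rfl⟩, by simp [hv]⟩

theorem pvInd_sorted (v : Int) (xs : List Int) (s : Int) :
    ((PySem.List.enumerate xs s).filterMap (fun p => if p.2 = v then some p.1 else none)).Pairwise (· < ·) := by
  rw [List.pairwise_filterMap]
  refine (PySem.List.pairwise_lt_enumerate xs s).imp ?_
  intro p q hpq
  intro x hx y hy
  split_ifs at hx hy
  simp only [Option.some.injEq] at hx hy
  omega

theorem pairwise_two_distinct {l : List Int} (h : l.Pairwise (· < ·)) (hl : 2 ≤ l.length) :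
    ∃ i j, i ∈ l ∧ j ∈ l ∧ i ≠ j := by
  match l, hl with
  | a :: b :: t, _ =>
    have hab : a < b := (List.pairwise_cons.1 h).1 b (by simp)
    exact ⟨a, b, by simp, by simp, by omega⟩

theorem pairwise_singleton_of_all_eq {l : List Int} {c : Int} (h : l.Pairwise (· < ·))
    (hne : l ≠ []) (hall : ∀ x ∈ l, x = c) : l = [c] := by
  match l with
  | [a] => simp [hall a (by simp)]
  | a :: b :: t =>
    have hab : a < b := (List.pairwise_cons.1 h).1 b (by simp)
    have := hall a (by simp)
    have := hall b (by simp)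
    omega

theorem min?_some (xs : List Int) (h : xs ≠ []) :
    ∃ m, PySem.List.min? xs (fun x => x) = some m ∧ m ∈ xs ∧ ∀ x ∈ xs, m ≤ x := by
  cases hm : PySem.List.min? xs (fun x => x) with
  | none => exact absurd ((PySem.List.min?_eq_none_iff _ _).1 hm) h
  | some m => exact ⟨m, rfl, PySem.List.min?_mem hm, PySem.List.min?_isMin hm⟩

theorem max?_some (xs : List Int) (h : xs ≠ []) :
    ∃ m, PySem.List.max? xs (fun x => x) = some m ∧ m ∈ xs ∧ ∀ x ∈ xs, x ≤ m := by
  cases hm : PySem.List.max? xs (fun x => x) with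
  | none => exact absurd ((PySem.List.max?_eq_none_iff _ _).1 hm) h
  | some m => exact ⟨m, rfl, PySem.List.max?_mem hm, PySem.List.max?_isMax hm⟩

theorem pv_getElem_idx (xs : List Int) {i j : Nat} (hi : i < xs.length) (hj : j < xs.length) (h : i = j) : xs[i] = xs[j] := by subst h; rfl

theorem A_char (ar1 ar2 : List Int) (h1 : ar1 ≠ []) (h2 : ar2 ≠ []) (hD : ¬ D_twinArrays ar1 ar2) (hS : pvSums ar1 ar2 ≠ []) :
    twinArrays ar1 ar2 ∈ pvSums ar1 ar2 ∧ ∀ s ∈ pvSums ar1 ar2, twinArrays ar1 ar2 ≤ s := by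
  obtain ⟨m1, hm1, hm1mem, hm1min⟩ := min?_some ar1 h1
  obtain ⟨m2, hm2, hm2mem, hm2min⟩ := min?_some ar2 h2
  obtain ⟨M1, hM1, hM1mem, hM1max⟩ := max?_some ar1 h1
  obtain ⟨M2, hM2, hM2mem, hM2max⟩ := max?_some ar2 h2
  have hA : twinArrays ar1 ar2 =
      (if PySem.List.index? ar1 m1 ≠ PySem.List.index? ar2 m2 ∨
          (((PySem.List.enumerate ar1).filterMap (fun p => if p.2 = m1 then some p.1 else none)).length ≠ 1 ∨
           ((PySem.List.enumerate ar2).filterMap (fun p => if p.2 = m2 then some p.1 else none)).length ≠ 1) then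
        m1 + m2
      else
        (if m1 + ar2.foldl (fun s d => if d < s ∧ d ≠ m2 then d else s) M2 <
            m2 + ar1.foldl (fun s c => if c < s ∧ c ≠ m1 then c else s) M1 then
          m1 + ar2.foldl (fun s d => if d < s ∧ d ≠ m2 then d else s) M2
         else m2 + ar1.foldl (fun s c => if c < s ∧ c ≠ m1 then c else s) M1)) := by
    simp only [twinArrays, hm1, hm2, hM1, hM2, Option.getD_some]
  -- index? facts
  obtain ⟨p1, hp1⟩ : ∃ p, PySem.List.index? ar1 m1 = some p := by
    rw [← Option.isSome_iff_exists, PySem.List.index?_isSome_iff]; exact hm1mem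
  obtain ⟨p2, hp2⟩ : ∃ p, PySem.List.index? ar2 m2 = some p := by
    rw [← Option.isSome_iff_exists, PySem.List.index?_isSome_iff]; exact hm2mem
  obtain ⟨hp1lt, hp1v, -⟩ := PySem.List.getElem_of_index?_eq_some hp1
  obtain ⟨hp2lt, hp2v, -⟩ := PySem.List.getElem_of_index?_eq_some hp2
  have lb_easy : ∀ s ∈ pvSums ar1 ar2, m1 + m2 ≤ s := by
    intro s hs
    rw [mem_pvSums] at hs
    obtain ⟨i, j, hi, hj, hij, rfl⟩ := hs
    exact add_le_add (hm1min _ (ar1.getElem_mem hi)) (hm2min _ (ar2.getElem_mem hj))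
  have hmemI1 : (p1 : Int) ∈ (PySem.List.enumerate ar1).filterMap (fun p => if p.2 = m1 then some p.1 else none) := by
    rw [mem_pvInd]; exact ⟨p1, hp1lt, by omega, hp1v⟩
  have hmemI2 : (p2 : Int) ∈ (PySem.List.enumerate ar2).filterMap (fun p => if p.2 = m2 then some p.1 else none) := by
    rw [mem_pvInd]; exact ⟨p2, hp2lt, by omega, hp2v⟩
  by_cases hcond : PySem.List.index? ar1 m1 ≠ PySem.List.index? ar2 m2 ∨
      (((PySem.List.enumerate ar1).filterMap (fun p => if p.2 = m1 then some p.1 else none)).length ≠ 1 ∨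
       ((PySem.List.enumerate ar2).filterMap (fun p => if p.2 = m2 then some p.1 else none)).length ≠ 1)
  · rw [hA, if_pos hcond]
    refine ⟨?_, lb_easy⟩
    rw [mem_pvSums]
    rcases hcond with hpq | hlen | hlen
    · -- distinct first-occurrence indices
      rw [hp1, hp2, Ne, Option.some_inj] at hpq
      exact ⟨p1, p2, hp1lt, hp2lt, hpq, by rw [hp1v, hp2v]⟩
    · -- m1 occurs at least twice
      have hlen2 : 2 ≤ ((PySem.List.enumerate ar1).filterMap (fun p => if p.2 = m1 then some p.1 else none)).length := by
        have := List.length_pos_of_mem hmemI1; omega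
      obtain ⟨i, j, hi, hj, hij⟩ := pairwise_two_distinct (pvInd_sorted m1 ar1 0) hlen2
      rw [mem_pvInd] at hi hj
      obtain ⟨k, hk, rfl, hkv⟩ := hi
      obtain ⟨k', hk', rfl, hk'v⟩ := hj
      have hkk' : k ≠ k' := by omega
      by_cases hkp : k = p2
      · exact ⟨k', p2, hk', hp2lt, by omega, by rw [hk'v, hp2v]⟩
      · exact ⟨k, p2, hk, hp2lt, hkp, by rw [hkv, hp2v]⟩
    · -- m2 occurs at least twice
      have hlen2 : 2 ≤ ((PySem.List.enumerate ar2).filterMap (fun p => if p.2 = m2 then some p.1 else none)).length := by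
        have := List.length_pos_of_mem hmemI2; omega
      obtain ⟨i, j, hi, hj, hij⟩ := pairwise_two_distinct (pvInd_sorted m2 ar2 0) hlen2
      rw [mem_pvInd] at hi hj
      obtain ⟨k, hk, rfl, hkv⟩ := hi
      obtain ⟨k', hk', rfl, hk'v⟩ := hj
      have hkk' : k ≠ k' := by omega
      by_cases hkp : p1 = k
      · exact ⟨p1, k', hp1lt, hk', by omega, by rw [hp1v, hk'v]⟩
      · exact ⟨p1, k, hp1lt, hk, hkp, by rw [hp1v, hkv]⟩
  · -- unique minima at the same index
    push_neg at hcond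
    obtain ⟨hpq, hlen1, hlen2⟩ := hcond
    rw [hp1, hp2, Option.some_inj] at hpq
    subst hpq
    -- uniqueness of the minimum positions
    have huniq1 : ∀ (k : Nat) (hk : k < ar1.length), ar1[k] = m1 → k = p1 := by
      intro k hk hkv
      obtain ⟨x, hx⟩ := List.length_eq_one_iff.1 hlen1
      have h1' := hmemI1; rw [hx] at h1'
      have h2' : (k : Int) ∈ (PySem.List.enumerate ar1).filterMap (fun p => if p.2 = m1 then some p.1 else none) := by
        rw [mem_pvInd]; exact ⟨k, hk, by omega, hkv⟩
      rw [hx] at h2'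
      simp only [List.mem_singleton] at h1' h2'
      omega
    have huniq2 : ∀ (k : Nat) (hk : k < ar2.length), ar2[k] = m2 → k = p1 := by
      intro k hk hkv
      obtain ⟨x, hx⟩ := List.length_eq_one_iff.1 hlen2
      have h1' := hmemI2; rw [hx] at h1'
      have h2' : (k : Int) ∈ (PySem.List.enumerate ar2).filterMap (fun p => if p.2 = m2 then some p.1 else none) := by
        rw [mem_pvInd]; exact ⟨k, hk, by omega, hkv⟩
      rw [hx] at h2'
      simp only [List.mem_singleton] at h1' h2'
      omega
    -- both lists have length ≥ 2
    have hL1 : 0 < ar1.length := List.length_pos_iff.mpr h1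
    have hL2 : 0 < ar2.length := List.length_pos_iff.mpr h2
    have hnb : ¬(ar1.length = 1 ∧ ar2.length = 1) := by
      rintro ⟨u, v⟩; exact hS (pvSums_nil ar1 ar2 u v)
    have hlen1' : 2 ≤ ar1.length := by
      by_contra hx
      have e1 : ar1.length = 1 := by omega
      have e2 : 2 ≤ ar2.length := by rcases Nat.lt_or_ge ar2.length 2 with h | h; · omega
                                     · exact h
      have hp10 : p1 = 0 := by omega
      apply hD; left
      refine ⟨e1, e2, ?_⟩
      obtain ⟨b, t, rfl⟩ := List.exists_cons_of_ne_nil h2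
      intro y hy
      simp only [List.tail_cons] at hy
      obtain ⟨k, hk, rfl⟩ := List.mem_iff_getElem.1 hy
      have hk1 : k + 1 < (b :: t).length := by simp; omega
      have he : (b :: t)[k + 1] = t[k] := by simp
      have hne : (b :: t)[k + 1] ≠ m2 := by
        intro hvv
        have := huniq2 (k + 1) hk1 hvv
        omega
      have hge : m2 ≤ (b :: t)[k + 1] := hm2min _ (List.getElem_mem hk1)
      have hb : b = m2 := by
        have e := pv_getElem_idx (b :: t) (show (0:Nat) < (b :: t).length by simp) hp2lt hp10.symm
        simpa using e.trans hp2v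
      simp only [List.headD_cons]
      omega
    have hlen2' : 2 ≤ ar2.length := by
      by_contra hx
      have e1 : ar2.length = 1 := by omega
      have e2 : 2 ≤ ar1.length := by omega
      have hp10 : p1 = 0 := by omega
      apply hD; right
      refine ⟨e1, e2, ?_⟩
      obtain ⟨b, t, rfl⟩ := List.exists_cons_of_ne_nil h1
      intro y hy
      simp only [List.tail_cons] at hy
      obtain ⟨k, hk, rfl⟩ := List.mem_iff_getElem.1 hy
      have hk1 : k + 1 < (b :: t).length := by simp; omega
      have he : (b :: t)[k + 1] = t[k] := by simp
      have hne : (b :: t)[k + 1] ≠ m1 := by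
        intro hvv
        have := huniq1 (k + 1) hk1 hvv
        omega
      have hge : m1 ≤ (b :: t)[k + 1] := hm1min _ (List.getElem_mem hk1)
      have hb : b = m1 := by
        have e := pv_getElem_idx (b :: t) (show (0:Nat) < (b :: t).length by simp) hp1lt hp10.symm
        simpa using e.trans hp1v
      simp only [List.headD_cons]
      omega
    -- the maxima differ from the minima
    have hM1ne : M1 ≠ m1 := by
      have h01 : (0 : Nat) < ar1.length := by omega
      have h11 : (1 : Nat) < ar1.length := by omega
      by_cases hp0 : p1 = 0
      · have hne : ar1[1] ≠ m1 := fun hv => by have := huniq1 1 h11 hv; omega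
        have := hm1min _ (ar1.getElem_mem h11)
        have := hM1max _ (ar1.getElem_mem h11)
        omega
      · have hne : ar1[0] ≠ m1 := fun hv => by have := huniq1 0 h01 hv; omega
        have := hm1min _ (ar1.getElem_mem h01)
        have := hM1max _ (ar1.getElem_mem h01)
        omega
    have hM2ne : M2 ≠ m2 := by
      have h01 : (0 : Nat) < ar2.length := by omega
      have h11 : (1 : Nat) < ar2.length := by omega
      by_cases hp0 : p1 = 0
      · have hne : ar2[1] ≠ m2 := fun hv => by have := huniq2 1 h11 hv; omega
        have := hm2min _ (ar2.getElem_mem h11)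
        have := hM2max _ (ar2.getElem_mem h11)
        omega
      · have hne : ar2[0] ≠ m2 := fun hv => by have := huniq2 0 h01 hv; omega
        have := hm2min _ (ar2.getElem_mem h01)
        have := hM2max _ (ar2.getElem_mem h01)
        omega
    -- second minima
    obtain ⟨hs1mem', hs1ne, hs1le, hs1lb⟩ := second_fold m1 ar1 M1 hM1ne
    obtain ⟨hs2mem', hs2ne, hs2le, hs2lb⟩ := second_fold m2 ar2 M2 hM2ne
    set s1 := ar1.foldl (fun s c => if c < s ∧ c ≠ m1 then c else s) M1 with hs1def
    set s2 := ar2.foldl (fun s d => if d < s ∧ d ≠ m2 then d else s) M2 with hs2def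
    have hs1mem : s1 ∈ ar1 := by rcases hs1mem' with h | h; · rw [h]; exact hM1mem
                                 · exact h
    have hs2mem : s2 ∈ ar2 := by rcases hs2mem' with h | h; · rw [h]; exact hM2mem
                                 · exact h
    -- memberships of the two candidate sums
    obtain ⟨k1, hk1, hk1v⟩ := List.mem_iff_getElem.1 hs1mem
    obtain ⟨k2, hk2, hk2v⟩ := List.mem_iff_getElem.1 hs2mem
    have hk1ne : k1 ≠ p1 := by
      intro hv
      apply hs1ne
      have e := pv_getElem_idx ar1 hk1 hp1lt hv
      rw [hk1v, hp1v] at e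
      exact e
    have hk2ne : k2 ≠ p1 := by
      intro hv
      apply hs2ne
      have e := pv_getElem_idx ar2 hk2 hp2lt hv
      rw [hk2v, hp2v] at e
      exact e
    have hmemA : m1 + s2 ∈ pvSums ar1 ar2 := by
      rw [mem_pvSums]
      exact ⟨p1, k2, hp1lt, hk2, fun h => hk2ne h.symm, by rw [hp1v, hk2v]⟩
    have hmemB : m2 + s1 ∈ pvSums ar1 ar2 := by
      rw [mem_pvSums]
      exact ⟨k1, p1, hk1, hp2lt, hk1ne, by rw [hp2v, hk1v]; ring⟩
    -- lower bound
    have hlb : ∀ s ∈ pvSums ar1 ar2, (m1 + s2 ≤ s ∨ m2 + s1 ≤ s) := by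
      intro s hs
      rw [mem_pvSums] at hs
      obtain ⟨i, j, hi, hj, hij, rfl⟩ := hs
      by_cases hip : i = p1
      · left
        have hjne : ar2[j] ≠ m2 := fun hv => hij (hip.trans (huniq2 j hj hv).symm)
        have := hs2lb _ (ar2.getElem_mem hj) hjne
        have : ar1[i] = m1 := (pv_getElem_idx ar1 hi hp1lt hip).trans hp1v
        omega
      · right
        have hine : ar1[i] ≠ m1 := fun hv => hip (huniq1 i hi hv)
        have := hs1lb _ (ar1.getElem_mem hi) hine
        have := hm2min _ (ar2.getElem_mem hj)
        omega
    rw [hA, if_neg]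
    · constructor
      · split_ifs with h
        · exact hmemA
        · exact hmemB
      · intro s hs
        have := hlb s hs
        split_ifs with h <;> omega
    · push_neg
      exact ⟨by rw [hp1, hp2], hlen1, hlen2⟩

theorem A_single (a b : Int) : twinArrays [a] [b] = b + a := by
  have h1 : PySem.List.min? [a] (fun x => x) = some a := by simp [PySem.List.min?_id_cons]
  have h2 : PySem.List.min? [b] (fun x => x) = some b := by simp [PySem.List.min?_id_cons]
  have h3 : PySem.List.max? [a] (fun x => x) = some a := by simp [PySem.List.max?_id_cons]
  have h4 : PySem.List.max? [b] (fun x => x) = some b := by simp [PySem.List.max?_id_cons]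
  simp only [twinArrays, h1, h2, h3, h4, Option.getD_some, PySem.List.index?_cons_self,
    PySem.List.enumerate_cons, PySem.List.enumerate_nil]
  rw [if_neg (by simp)]
  have f1 : [a].foldl (fun s c => if c < s ∧ c ≠ a then c else s) a = a := by simp
  have f2 : [b].foldl (fun s d => if d < s ∧ d ≠ b then d else s) b = b := by simp
  rw [f1, f2, if_neg (by omega)]

theorem alt_single (a b : Int) : twinArrays_alt [a] [b] = a + b := by
  have := alt_eq_of_nil [a] [b] rfl
  simpa [PySem.List.pyGet?] using this

theorem tight_core (a b c : Int) (t' : List Int) (hmin : ∀ y ∈ c :: t', b < y) :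
    twinArrays [a] (b :: c :: t') = b + a ∧
    b + a < twinArrays_alt [a] (b :: c :: t') := by
  have hm1 : PySem.List.min? [a] (fun x => x) = some a := by simp [PySem.List.min?_id_cons]
  have hM1 : PySem.List.max? [a] (fun x => x) = some a := by simp [PySem.List.max?_id_cons]
  obtain ⟨m2, hm2, hm2mem, hm2min⟩ := min?_some (b :: c :: t') (by simp)
  have hm2b : m2 = b := by
    have h1 := hm2min b (by simp)
    rcases List.mem_cons.1 hm2mem with h | h
    · exact h
    · have := hmin _ h; omega
  rw [hm2b] at hm2 hm2min
  obtain ⟨M2, hM2, hM2mem, hM2max⟩ := max?_some (b :: c :: t') (by simp)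
  have hM2ne : M2 ≠ b := by
    have hc := hmin c (by simp)
    have := hM2max c (by simp)
    omega
  obtain ⟨hs2mem', hs2ne, hs2le, hs2lb⟩ := second_fold b (b :: c :: t') M2 hM2ne
  have hFgt : b < (b :: c :: t').foldl (fun s d => if d < s ∧ d ≠ b then d else s) M2 := by
    rcases hs2mem' with h | h
    · rw [h]
      have := hM2max c (by simp)
      have := hmin c (by simp)
      omega
    · have := hm2min _ h
      exact lt_of_le_of_ne this (Ne.symm hs2ne)
  have hI2 : (PySem.List.enumerate (b :: c :: t')).filterMap (fun p => if p.2 = b then some p.1 else none) = [(0 : Int)] := by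
    apply pairwise_singleton_of_all_eq (pvInd_sorted b (b :: c :: t') 0)
    · apply List.ne_nil_of_mem (a := (0 : Int))
      rw [mem_pvInd]
      exact ⟨0, by simp, by omega, by simp⟩
    · intro x hx
      rw [mem_pvInd] at hx
      obtain ⟨k, hk, rfl, hkv⟩ := hx
      match k with
      | 0 => omega
      | (k' + 1) =>
        have he : (b :: c :: t')[k' + 1] = (c :: t')[k']'(by simpa using hk) := by simp
        have hmem : (c :: t')[k']'(by simpa using hk) ∈ c :: t' := List.getElem_mem _
        have := hmin _ hmem
        rw [he] at hkv
        omega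
  have hA : twinArrays [a] (b :: c :: t') = b + a := by
    simp only [twinArrays, hm1, hM1, hm2, hM2, Option.getD_some]
    rw [hI2]
    rw [PySem.List.index?_cons_self, PySem.List.index?_cons_self]
    have hcond : ¬((some (0:Nat) ≠ some (0:Nat)) ∨
        (((PySem.List.enumerate [a]).filterMap (fun p => if p.2 = a then some p.1 else none)).length ≠ 1 ∨
         ([(0:Int)].length ≠ 1))) := by
      simp [PySem.List.enumerate_cons, PySem.List.enumerate_nil]
    rw [if_neg hcond]
    have hfold1 : [a].foldl (fun s c => if c < s ∧ c ≠ a then c else s) a = a := by simp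
    rw [hfold1]
    rw [if_neg (by omega)]
  refine ⟨hA, ?_⟩
  have hSne : pvSums [a] (b :: c :: t') ≠ [] := by
    apply List.ne_nil_of_mem (a := a + c)
    rw [mem_pvSums]
    exact ⟨0, 1, by simp, by simp, by omega, by simp⟩
  obtain ⟨hBmem, -⟩ := alt_eq_of_ne [a] (b :: c :: t') hSne
  rw [mem_pvSums] at hBmem
  obtain ⟨i, j, hi, hj, hij, hBval⟩ := hBmem
  have hi0 : i = 0 := by simp at hi; omega
  subst hi0
  have hj0 : j ≠ 0 := fun h => hij h.symm
  obtain ⟨k, rfl⟩ := Nat.exists_eq_succ_of_ne_zero hj0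
  have he : (b :: c :: t')[k + 1] = (c :: t')[k]'(by simpa using hj) := by simp
  have hmem : (c :: t')[k]'(by simpa using hj) ∈ c :: t' := List.getElem_mem _
  have hgt := hmin _ hmem
  rw [hBval]
  have h0 : [a][0] = a := rfl
  rw [h0, he]
  omega

theorem tight_core' (a b c : Int) (t' : List Int) (hmin : ∀ y ∈ c :: t', b < y) :
    twinArrays (b :: c :: t') [a] = a + b ∧
    a + b < twinArrays_alt (b :: c :: t') [a] := by
  have hm2 : PySem.List.min? [a] (fun x => x) = some a := by simp [PySem.List.min?_id_cons]
  have hM2 : PySem.List.max? [a] (fun x => x) = some a := by simp [PySem.List.max?_id_cons]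
  obtain ⟨m1, hm1, hm1mem, hm1min⟩ := min?_some (b :: c :: t') (by simp)
  have hm1b : m1 = b := by
    have h1 := hm1min b (by simp)
    rcases List.mem_cons.1 hm1mem with h | h
    · exact h
    · have := hmin _ h; omega
  rw [hm1b] at hm1 hm1min
  obtain ⟨M1, hM1, hM1mem, hM1max⟩ := max?_some (b :: c :: t') (by simp)
  have hM1ne : M1 ≠ b := by
    have hc := hmin c (by simp)
    have := hM1max c (by simp)
    omega
  obtain ⟨hs1mem', hs1ne, hs1le, hs1lb⟩ := second_fold b (b :: c :: t') M1 hM1ne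
  have hFgt : b < (b :: c :: t').foldl (fun s d => if d < s ∧ d ≠ b then d else s) M1 := by
    rcases hs1mem' with h | h
    · rw [h]
      have := hM1max c (by simp)
      have := hmin c (by simp)
      omega
    · have := hm1min _ h
      exact lt_of_le_of_ne this (Ne.symm hs1ne)
  have hI1 : (PySem.List.enumerate (b :: c :: t')).filterMap (fun p => if p.2 = b then some p.1 else none) = [(0 : Int)] := by
    apply pairwise_singleton_of_all_eq (pvInd_sorted b (b :: c :: t') 0)
    · apply List.ne_nil_of_mem (a := (0 : Int))
      rw [mem_pvInd]
      exact ⟨0, by simp, by omega, by simp⟩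
    · intro x hx
      rw [mem_pvInd] at hx
      obtain ⟨k, hk, rfl, hkv⟩ := hx
      match k with
      | 0 => omega
      | (k' + 1) =>
        have he : (b :: c :: t')[k' + 1] = (c :: t')[k']'(by simpa using hk) := by simp
        have hmem : (c :: t')[k']'(by simpa using hk) ∈ c :: t' := List.getElem_mem _
        have := hmin _ hmem
        rw [he] at hkv
        omega
  have hA : twinArrays (b :: c :: t') [a] = b + a := by
    simp only [twinArrays, hm1, hM1, hm2, hM2, Option.getD_some]
    rw [hI1]
    rw [PySem.List.index?_cons_self, PySem.List.index?_cons_self]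
    have hcond : ¬((some (0:Nat) ≠ some (0:Nat)) ∨
        (([(0:Int)].length ≠ 1) ∨
         (((PySem.List.enumerate [a]).filterMap (fun p => if p.2 = a then some p.1 else none)).length ≠ 1))) := by
      simp [PySem.List.enumerate_cons, PySem.List.enumerate_nil]
    rw [if_neg hcond]
    have hfold2 : [a].foldl (fun s d => if d < s ∧ d ≠ a then d else s) a = a := by simp
    rw [hfold2]
    rw [if_pos (by omega)]
  refine ⟨by rw [hA]; ring, ?_⟩
  have hSne : pvSums (b :: c :: t') [a] ≠ [] := by
    apply List.ne_nil_of_mem (a := c + a)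
    rw [mem_pvSums]
    exact ⟨1, 0, by simp, by simp, by omega, by simp⟩
  obtain ⟨hBmem, -⟩ := alt_eq_of_ne (b :: c :: t') [a] hSne
  rw [mem_pvSums] at hBmem
  obtain ⟨i, j, hi, hj, hij, hBval⟩ := hBmem
  have hj0 : j = 0 := by simp at hj; omega
  subst hj0
  have hi0 : i ≠ 0 := hij
  obtain ⟨k, rfl⟩ := Nat.exists_eq_succ_of_ne_zero hi0
  have he : (b :: c :: t')[k + 1] = (c :: t')[k]'(by simpa using hi) := by simp
  have hmem : (c :: t')[k]'(by simpa using hi) ∈ c :: t' := List.getElem_mem _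
  have hgt := hmin _ hmem
  rw [hBval]
  have h0 : [a][0] = a := rfl
  rw [h0, he]
  omega

-- ===== VERDICT (by name: the statement is the Claim_ definition above) =====
theorem twinArrays_spec : Claim_unchanged_twinArrays := by
  unfold Claim_unchanged_twinArrays
  intro ar1 ar2 hDom hPre hD
  obtain ⟨h1, h2⟩ := hPre
  show twinArrays ar1 ar2 = twinArrays_alt ar1 ar2
  by_cases hb : ar1.length = 1 ∧ ar2.length = 1
  · obtain ⟨e1, e2⟩ := hb
    obtain ⟨a, rfl⟩ := List.length_eq_one_iff.1 e1
    obtain ⟨b, rfl⟩ := List.length_eq_one_iff.1 e2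
    rw [A_single, alt_single]; ring
  · have hS := pvSums_ne_nil ar1 ar2 h1 h2 hb
    obtain ⟨hAmem, hAlb⟩ := A_char ar1 ar2 h1 h2 hD hS
    obtain ⟨hBmem, hBlb⟩ := alt_eq_of_ne ar1 ar2 hS
    exact le_antisymm (hAlb _ hBmem) (hBlb _ hAmem)
theorem twinArrays_changed : Claim_changed_twinArrays := by unfold Claim_changed_twinArrays; decide
theorem twinArrays_tight : Claim_exact_twinArrays := by
  unfold Claim_exact_twinArrays
  intro ar1 ar2 hDom hPre hD
  rcases hD with ⟨e1, hl, hmin⟩ | ⟨e1, hl, hmin⟩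
  · obtain ⟨a, rfl⟩ := List.length_eq_one_iff.1 e1
    obtain ⟨b, t, rfl⟩ := List.exists_cons_of_ne_nil (show ar2 ≠ [] by rintro rfl; simp at hl)
    obtain ⟨c, t', rfl⟩ := List.exists_cons_of_ne_nil (show t ≠ [] by rintro rfl; simp at hl)
    simp only [List.tail_cons, List.headD_cons] at hmin
    obtain ⟨hAv, hlt⟩ := tight_core a b c t' hmin
    rw [hAv]; omega
  · obtain ⟨a, rfl⟩ := List.length_eq_one_iff.1 e1
    obtain ⟨b, t, rfl⟩ := List.exists_cons_of_ne_nil (show ar1 ≠ [] by rintro rfl; simp at hl)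
    obtain ⟨c, t', rfl⟩ := List.exists_cons_of_ne_nil (show t ≠ [] by rintro rfl; simp at hl)
    simp only [List.tail_cons, List.headD_cons] at hmin
    obtain ⟨hAv, hlt⟩ := tight_core' a b c t' hmin
    rw [hAv]; omega
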